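-- pv_equiv track=rewrite | github.com/shamira-venturini/Geometry-of-Syntax | scripts/36_build_matched_strict_jabberwocky.py | candidate_is_too_close
-- ===== SOURCE A (Python) =====
-- from typing import Dict, Iterable, List, Mapping, Optional, Sequence, Set, Tuple
--
-- def levenshtein(a: str, b: str, max_distance: Optional[int] = None) -> int:
--     if max_distance is not None and abs(len(a) - len(b)) > max_distance:
--         return max_distance + 1
--     previous = list(range(len(b) + 1))
--     for i, ca in enumerate(a, start=1):
--         current = [i]
--         row_min = current[0]
--         for j, cb in enumerate(b, start=1):
--             current.append(min(previous[j] + 1, current[j - 1] + 1, previous[j - 1] + (ca != cb)))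
--             row_min = min(row_min, current[-1])
--         if max_distance is not None and row_min > max_distance:
--             return max_distance + 1
--         previous = current
--     return previous[-1]
--
-- def candidate_is_too_close(candidate: str, source: str, project_words: Set[str]) -> bool:
--     threshold = 1 if len(source) <= 5 else 2
--     if levenshtein(candidate, source, max_distance=threshold) <= threshold:
--         return True
--     for word in project_words:
--         if word[:1] != candidate[:1]:
--             continue
--         if abs(len(candidate) - len(word)) <= threshold and levenshtein(candidate, word, threshold) <= threshold:
--             return True
--     return False
-- ===== SOURCE B (Python) =====
-- def _within(a, b, i, j, k):
--     # Is the edit distance between a[:i] and b[:j] at most k?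
--     # Trim the common suffix, then branch-and-bound on the last mismatch.
--     while i > 0 and j > 0 and a[i - 1] == b[j - 1]:
--         i -= 1
--         j -= 1
--     if i == 0:
--         return j <= k
--     if j == 0:
--         return i <= k
--     if k <= 0:
--         return False
--     return (_within(a, b, i - 1, j, k - 1)
--             or _within(a, b, i, j - 1, k - 1)
--             or _within(a, b, i - 1, j - 1, k - 1))
--
-- def candidate_is_too_close(candidate, source, project_words):
--     threshold = 1 if len(source) <= 5 else 2
--     if _within(candidate, source, len(candidate), len(source), threshold):
--         return True
--     first = candidate[:1]
--     return any(word[:1] == first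
--                and _within(candidate, word, len(candidate), len(word), threshold)
--                for word in project_words)
-- ===== Notes on version B (the rewrite author's own statement) =====
-- stated objective: faster
-- what changed: Replaces the banded Levenshtein row DP with a depth-bounded branch-and-bound recursion (trim common suffix, then try delete/insert/substitute with budget k-1), deciding 'distance <= threshold' in O(3^t * L) per word instead of O(L^2); the redundant length pre-filter in the word loop is dropped.
import Mathlib
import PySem

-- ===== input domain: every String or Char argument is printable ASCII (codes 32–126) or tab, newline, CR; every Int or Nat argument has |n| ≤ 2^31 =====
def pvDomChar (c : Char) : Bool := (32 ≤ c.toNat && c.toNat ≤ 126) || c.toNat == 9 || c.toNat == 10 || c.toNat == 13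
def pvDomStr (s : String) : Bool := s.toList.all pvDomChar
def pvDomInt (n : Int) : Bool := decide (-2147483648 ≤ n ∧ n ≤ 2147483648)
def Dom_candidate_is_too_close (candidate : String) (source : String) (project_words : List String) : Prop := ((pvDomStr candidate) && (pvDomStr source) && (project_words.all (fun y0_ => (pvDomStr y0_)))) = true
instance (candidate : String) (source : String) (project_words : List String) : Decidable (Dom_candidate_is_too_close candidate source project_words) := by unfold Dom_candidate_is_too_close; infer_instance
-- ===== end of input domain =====

-- B replaces A's banded Levenshtein row DP with a budgeted branch-and-bound recursion
-- (trim the common suffix, then try delete/insert/substitute with budget k-1): objective = faster.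

-- B replaces A's banded Levenshtein row DP with a budgeted branch-and-bound recursion
-- (trim common suffix, then try delete/insert/substitute with budget k-1): objective = faster.

-- ===== PORT A =====

-- inner 'for j, cb in enumerate(b, 1)' loop of levenshtein; state = (current, row_min).
-- previous[j], previous[j-1], current[j-1] are always in range here, so pyGetD is exact for Python's indexing.
def pvLevRow (ca : Char) (b : List Char) (previous : List Int) (i : Int) : List Int × Int :=
  (PySem.List.enumerate b 1).foldl
    (fun st jcb =>
      let current := st.1
      let rowMin := st.2
      let v := min (PySem.List.pyGetD previous jcb.1 0 + 1)
                 (min (PySem.List.pyGetD current (jcb.1 - 1) 0 + 1)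
                      (PySem.List.pyGetD previous (jcb.1 - 1) 0 + (if ca ≠ jcb.2 then 1 else 0)))
      (current ++ [v], min rowMin v))
    ([i], PySem.List.pyGetD [i] 0 0)

-- outer 'for i, ca in enumerate(a, 1)' loop with the early 'return max_distance + 1'
def pvLevLoop (b : List Char) (m? : Option Int) : List Char → Int → List Int → Int
  | [], _, previous => PySem.List.pyGetD previous (-1) 0
  | ca :: rest, i, previous =>
    let row := pvLevRow ca b previous i
    match m? with
    | some m => if row.2 > m then m + 1 else pvLevLoop b m? rest (i + 1) row.1
    | none => pvLevLoop b m? rest (i + 1) row.1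

-- levenshtein(a, b, max_distance) of Source A
def pvLevenshtein (a b : String) (m? : Option Int) : Int :=
  match m? with
  | some m =>
    if |PySem.Str.len a - PySem.Str.len b| > m then m + 1
    else pvLevLoop b.toList (some m) a.toList 1 (PySem.List.pyRange 0 (PySem.Str.len b + 1) 1)
  | none => pvLevLoop b.toList none a.toList 1 (PySem.List.pyRange 0 (PySem.Str.len b + 1) 1)

-- 'for word in project_words: …' with its early 'return True' (word[:1] is the slice [:1])
def pvWordLoop (candidate : String) (threshold : Int) : List String → Bool
  | [] => false
  | word :: rest =>
    if PySem.List.slice word.toList none (some 1) ≠ PySem.List.slice candidate.toList none (some 1) then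
      pvWordLoop candidate threshold rest
    else if |PySem.Str.len candidate - PySem.Str.len word| ≤ threshold
            ∧ pvLevenshtein candidate word (some threshold) ≤ threshold then true
    else pvWordLoop candidate threshold rest

def candidate_is_too_close (candidate : String) (source : String) (project_words : List String) : Bool :=
  let threshold : Int := if PySem.Str.len source ≤ 5 then 1 else 2
  if pvLevenshtein candidate source (some threshold) ≤ threshold then true
  else pvWordLoop candidate threshold project_words

-- ===== PORT B =====

-- 'while i > 0 and j > 0 and a[i-1] == b[j-1]: i -= 1; j -= 1' of Source B's _within
-- (the indices are always in range when reached, so the Option equality of pyGet? is exact)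
def pvTrim (a b : List Char) (i j : Int) : Int × Int :=
  if h : 0 < i ∧ 0 < j ∧ PySem.List.pyGet? a (i - 1) = PySem.List.pyGet? b (j - 1) then
    pvTrim a b (i - 1) (j - 1)
  else (i, j)
termination_by i.toNat
decreasing_by omega

-- _within(a, b, i, j, k) of Source B
def pvWithin (a b : List Char) (i j k : Int) : Bool :=
  let p := pvTrim a b i j
  if p.1 = 0 then decide (p.2 ≤ k)
  else if p.2 = 0 then decide (p.1 ≤ k)
  else if k ≤ 0 then false
  else pvWithin a b (p.1 - 1) p.2 (k - 1) || pvWithin a b p.1 (p.2 - 1) (k - 1)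
       || pvWithin a b (p.1 - 1) (p.2 - 1) (k - 1)
termination_by k.toNat
decreasing_by all_goals omega

def candidate_is_too_close_alt (candidate : String) (source : String) (project_words : List String) : Bool :=
  let threshold : Int := if PySem.Str.len source ≤ 5 then 1 else 2
  if pvWithin candidate.toList source.toList (PySem.Str.len candidate) (PySem.Str.len source) threshold then true
  else
    let first := PySem.List.slice candidate.toList none (some 1)
    project_words.any (fun word =>
      decide (PySem.List.slice word.toList none (some 1) = first)
      && pvWithin candidate.toList word.toList (PySem.Str.len candidate) (PySem.Str.len word) threshold)

-- ===== PRECONDITION & SPEC =====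
def Spec_candidate_is_too_close (candidate : String) (source : String) (project_words : List String) (out : Bool) : Prop := out = candidate_is_too_close_alt candidate source project_words
instance (candidate : String) (source : String) (project_words : List String) (out : Bool) : Decidable (Spec_candidate_is_too_close candidate source project_words out) := by unfold Spec_candidate_is_too_close; infer_instance

-- ===== CLAIM (what is proved, stated in full; the proofs are below) =====
def Claim_equal_candidate_is_too_close : Prop := ∀ (candidate : String) (source : String) (project_words : List String), Dom_candidate_is_too_close candidate source project_words → Spec_candidate_is_too_close candidate source project_words (candidate_is_too_close candidate source project_words)

-- ===== LEMMAS AND PROOFS =====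

-- reference edit distance (textbook recurrence); both ports are characterized against it
def pvDist : List Char → List Char → Nat
  | [], v => v.length
  | _ :: u, [] => u.length + 1
  | x :: u, y :: v =>
      min (pvDist u (y :: v) + 1)
        (min (pvDist (x :: u) v + 1) (pvDist u v + (if x = y then 0 else 1)))
termination_by u v => u.length + v.length

theorem pvDist_len_bound (u v : List Char) :
    u.length ≤ pvDist u v + v.length ∧ v.length ≤ pvDist u v + u.length := by
  induction u, v using pvDist.induct with
  | case1 v => simp [pvDist]
  | case2 x u => simp [pvDist]
  | case3 x u y v ih1 ih2 ih3 =>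
    simp only [pvDist, List.length_cons]
    simp only [List.length_cons] at ih1 ih2 ih3
    split_ifs <;> omega
theorem pvDist_nil_right' (u : List Char) : pvDist u [] = u.length := by
  cases u <;> simp [pvDist]

theorem pvDist_cons_left_le (x : Char) (u v : List Char) :
    pvDist (x :: u) v ≤ pvDist u v + 1 := by
  cases v with
  | nil => simp [pvDist_nil_right']
  | cons y v => simp only [pvDist]; omega

theorem pvDist_cons_right_le (y : Char) (u v : List Char) :
    pvDist u (y :: v) ≤ pvDist u v + 1 := by
  cases u with
  | nil => simp [pvDist]
  | cons x u => simp only [pvDist]; omega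

theorem pvDist_le_cons_right (y : Char) (u v : List Char) :
    pvDist u v ≤ pvDist u (y :: v) + 1 := by
  induction u generalizing y v with
  | nil => simp [pvDist]; omega
  | cons x u ih =>
    cases v with
    | nil =>
      have h := (pvDist_len_bound (x :: u) [y]).1
      simp only [pvDist_nil_right', List.length_cons, List.length_nil] at *
      omega
    | cons z v =>
      have h1 : pvDist (x :: u) (z :: v) ≤ pvDist u (z :: v) + 1 := pvDist_cons_left_le x u (z :: v)
      have h2 := ih z v
      have h3 := ih y (z :: v)
      conv_rhs => rw [pvDist]
      split_ifs <;> omega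

theorem pvDist_le_cons_left (x : Char) (u v : List Char) :
    pvDist u v ≤ pvDist (x :: u) v + 1 := by
  induction v generalizing x u with
  | nil => simp [pvDist_nil_right']; omega
  | cons z v ih =>
    cases u with
    | nil =>
      have h := (pvDist_len_bound [x] (z :: v)).2
      simp only [pvDist, List.length_cons, List.length_nil] at *
      omega
    | cons w u =>
      have h1 : pvDist (w :: u) (z :: v) ≤ pvDist (w :: u) v + 1 := pvDist_cons_right_le z (w :: u) v
      have h2 := ih x (w :: u)
      conv_rhs => rw [pvDist]
      split_ifs <;> omega

theorem pvDist_cons_cons_eq (x : Char) (u v : List Char) :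
    pvDist (x :: u) (x :: v) = pvDist u v := by
  have h1 := pvDist_le_cons_right x u v
  have h2 := pvDist_le_cons_left x u v
  have e : (if x = x then (0:Nat) else 1) = 0 := if_pos rfl
  rw [pvDist, e]
  omega

def pvRT (l : List Char) (n : Nat) : List Char := (l.take n).reverse

theorem pvRT_succ (l : List Char) (n : Nat) (h : n < l.length) :
    pvRT l (n + 1) = l[n] :: pvRT l n := by
  unfold pvRT
  rw [List.take_add_one, List.getElem?_eq_getElem h]
  simp

theorem pvRT_len (l : List Char) (n : Nat) (h : n ≤ l.length) : (pvRT l n).length = n := by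
  simp [pvRT]; omega

theorem pvTrim_spec (a b : List Char) (i j : Int)
    (hi0 : 0 ≤ i) (hi : i ≤ a.length) (hj0 : 0 ≤ j) (hj : j ≤ b.length) :
    0 ≤ (pvTrim a b i j).1 ∧ (pvTrim a b i j).1 ≤ i ∧ 0 ≤ (pvTrim a b i j).2 ∧ (pvTrim a b i j).2 ≤ j ∧
    pvDist (pvRT a i.toNat) (pvRT b j.toNat)
      = pvDist (pvRT a (pvTrim a b i j).1.toNat) (pvRT b (pvTrim a b i j).2.toNat) ∧
    ¬ (0 < (pvTrim a b i j).1 ∧ 0 < (pvTrim a b i j).2 ∧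
        PySem.List.pyGet? a ((pvTrim a b i j).1 - 1) = PySem.List.pyGet? b ((pvTrim a b i j).2 - 1)) := by
  fun_induction pvTrim a b i j with
  | case1 i j h ih =>
    obtain ⟨hi', hj', hc⟩ := h
    have hlta : (i-1).toNat < a.length := by omega
    have hltb : (j-1).toNat < b.length := by omega
    have ha1 : PySem.List.pyGet? a (i - 1) = some (a[(i-1).toNat]'hlta) :=
      PySem.List.pyGet?_eq_some_getElem _ (by omega) (by exact_mod_cast (by omega : (i-1 : Int) < (a.length : Int)))
    have hb1 : PySem.List.pyGet? b (j - 1) = some (b[(j-1).toNat]'hltb) :=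
      PySem.List.pyGet?_eq_some_getElem _ (by omega) (by exact_mod_cast (by omega : (j-1 : Int) < (b.length : Int)))
    have hchar : a[(i-1).toNat]'hlta = b[(j-1).toNat]'hltb := by
      rw [ha1, hb1] at hc; exact Option.some.inj hc
    have hia : pvRT a i.toNat = (a[(i-1).toNat]'hlta) :: pvRT a (i-1).toNat := by
      have hh : i.toNat = (i-1).toNat + 1 := by omega
      rw [hh, pvRT_succ a _ hlta]
    have hjb : pvRT b j.toNat = (b[(j-1).toNat]'hltb) :: pvRT b (j-1).toNat := by
      have hh : j.toNat = (j-1).toNat + 1 := by omega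
      rw [hh, pvRT_succ b _ hltb]
    have ihh := ih (by omega) (by omega) (by omega) (by omega)
    refine ⟨by omega, by omega, by omega, by omega, ?_, ihh.2.2.2.2.2⟩
    rw [hia, hjb, hchar, pvDist_cons_cons_eq]
    exact ihh.2.2.2.2.1
  | case2 i j h =>
    exact ⟨hi0, le_refl _, hj0, le_refl _, rfl, h⟩
theorem pvDist_nil_left (v : List Char) : pvDist [] v = v.length := by
  simp [pvDist]

theorem pvWithin_core (a b : List Char) (k : Int)
    (ih : ∀ (k' : Int), k'.toNat < k.toNat → ∀ (i j : Int), 0 ≤ i → i ≤ a.length → 0 ≤ j → j ≤ b.length →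
      pvWithin a b i j k' = decide ((pvDist (pvRT a i.toNat) (pvRT b j.toNat) : Int) ≤ k'))
    (i j : Int)
    (hi0 : 0 ≤ i) (hi : i ≤ a.length) (hj0 : 0 ≤ j) (hj : j ≤ b.length) :
    pvWithin a b i j k = decide ((pvDist (pvRT a i.toNat) (pvRT b j.toNat) : Int) ≤ k) := by
  obtain ⟨h1, h2, h3, h4, h5, h6⟩ := pvTrim_spec a b i j hi0 hi hj0 hj
  rw [pvWithin]
  show (if (pvTrim a b i j).1 = 0 then decide ((pvTrim a b i j).2 ≤ k)
    else if (pvTrim a b i j).2 = 0 then decide ((pvTrim a b i j).1 ≤ k)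
    else if k ≤ 0 then false
    else pvWithin a b ((pvTrim a b i j).1 - 1) (pvTrim a b i j).2 (k - 1)
      || pvWithin a b (pvTrim a b i j).1 ((pvTrim a b i j).2 - 1) (k - 1)
      || pvWithin a b ((pvTrim a b i j).1 - 1) ((pvTrim a b i j).2 - 1) (k - 1)) = _
  rw [h5]
  by_cases hp1 : (pvTrim a b i j).1 = 0
  · rw [if_pos hp1, hp1]
    have hrt : pvRT a (0:Int).toNat = [] := rfl
    rw [hrt, pvDist_nil_left, pvRT_len b _ (by omega)]
    exact decide_eq_decide.mpr (by omega)
  rw [if_neg hp1]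
  by_cases hp2 : (pvTrim a b i j).2 = 0
  · rw [if_pos hp2, hp2]
    have hrt : pvRT b (0:Int).toNat = [] := rfl
    rw [hrt, pvDist_nil_right', pvRT_len a _ (by omega)]
    exact decide_eq_decide.mpr (by omega)
  rw [if_neg hp2]
  -- the stopped trim: last characters differ
  have hlta : ((pvTrim a b i j).1 - 1).toNat < a.length := by omega
  have hltb : ((pvTrim a b i j).2 - 1).toNat < b.length := by omega
  have ha1 : PySem.List.pyGet? a ((pvTrim a b i j).1 - 1) = some (a[((pvTrim a b i j).1 - 1).toNat]'hlta) :=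
    PySem.List.pyGet?_eq_some_getElem _ (by omega) (by exact_mod_cast (by omega : ((pvTrim a b i j).1 - 1 : Int) < (a.length : Int)))
  have hb1 : PySem.List.pyGet? b ((pvTrim a b i j).2 - 1) = some (b[((pvTrim a b i j).2 - 1).toNat]'hltb) :=
    PySem.List.pyGet?_eq_some_getElem _ (by omega) (by exact_mod_cast (by omega : ((pvTrim a b i j).2 - 1 : Int) < (b.length : Int)))
  have hx : a[((pvTrim a b i j).1 - 1).toNat]'hlta ≠ b[((pvTrim a b i j).2 - 1).toNat]'hltb := by
    intro he
    exact h6 ⟨by omega, by omega, by rw [ha1, hb1, he]⟩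
  have hia : pvRT a (pvTrim a b i j).1.toNat
      = (a[((pvTrim a b i j).1 - 1).toNat]'hlta) :: pvRT a ((pvTrim a b i j).1 - 1).toNat := by
    have hh : (pvTrim a b i j).1.toNat = ((pvTrim a b i j).1 - 1).toNat + 1 := by omega
    rw [hh, pvRT_succ a _ hlta]
  have hjb : pvRT b (pvTrim a b i j).2.toNat
      = (b[((pvTrim a b i j).2 - 1).toNat]'hltb) :: pvRT b ((pvTrim a b i j).2 - 1).toNat := by
    have hh : (pvTrim a b i j).2.toNat = ((pvTrim a b i j).2 - 1).toNat + 1 := by omega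
    rw [hh, pvRT_succ b _ hltb]
  have hdist : pvDist (pvRT a (pvTrim a b i j).1.toNat) (pvRT b (pvTrim a b i j).2.toNat)
      = min (pvDist (pvRT a ((pvTrim a b i j).1 - 1).toNat) (pvRT b (pvTrim a b i j).2.toNat) + 1)
          (min (pvDist (pvRT a (pvTrim a b i j).1.toNat) (pvRT b ((pvTrim a b i j).2 - 1).toNat) + 1)
            (pvDist (pvRT a ((pvTrim a b i j).1 - 1).toNat) (pvRT b ((pvTrim a b i j).2 - 1).toNat) + 1)) := by
    conv_lhs => rw [hia, hjb, pvDist, if_neg hx]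
    rw [← hia, ← hjb]
  by_cases hk0 : k ≤ 0
  · rw [if_pos hk0]
    symm
    rw [decide_eq_false_iff_not]
    rw [hdist]
    push_cast
    omega
  rw [if_neg hk0]
  rw [ih (k-1) (by omega) ((pvTrim a b i j).1 - 1) (pvTrim a b i j).2 (by omega) (by omega) (by omega) (by omega)]
  rw [ih (k-1) (by omega) (pvTrim a b i j).1 ((pvTrim a b i j).2 - 1) (by omega) (by omega) (by omega) (by omega)]
  rw [ih (k-1) (by omega) ((pvTrim a b i j).1 - 1) ((pvTrim a b i j).2 - 1) (by omega) (by omega) (by omega) (by omega)]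
  rw [← Bool.decide_or, ← Bool.decide_or]
  exact decide_eq_decide.mpr (by rw [hdist]; push_cast; omega)

theorem pvWithin_spec_aux (a b : List Char) : ∀ (n : Nat) (k : Int), k.toNat = n →
    ∀ (i j : Int), 0 ≤ i → i ≤ a.length → 0 ≤ j → j ≤ b.length →
    pvWithin a b i j k = decide ((pvDist (pvRT a i.toNat) (pvRT b j.toNat) : Int) ≤ k) := by
  intro n
  induction n using Nat.strong_induction_on with
  | _ n IH =>
    intro k hkn i j hi0 hi hj0 hj
    refine pvWithin_core a b k (fun k' hk' i' j' hi0' hi' hj0' hj' => ?_) i j hi0 hi hj0 hj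
    exact IH k'.toNat (by omega) k' rfl i' j' hi0' hi' hj0' hj'

theorem pvWithin_spec (a b : List Char) (k i j : Int)
    (hi0 : 0 ≤ i) (hi : i ≤ a.length) (hj0 : 0 ≤ j) (hj : j ≤ b.length) :
    pvWithin a b i j k = decide ((pvDist (pvRT a i.toNat) (pvRT b j.toNat) : Int) ≤ k) :=
  pvWithin_spec_aux a b k.toNat k rfl i j hi0 hi hj0 hj

-- ===== A-side =====
def pvEntry (u b : List Char) (j : Nat) : Int := (pvDist u (pvRT b j) : Int)
def pvRow (u b : List Char) (n : Nat) : List Int := (List.range (n + 1)).map (fun j => pvEntry u b j)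

theorem pvRow_getD (u b : List Char) (n j : Nat) (h : j < n + 1) :
    (pvRow u b n).getD j 0 = pvEntry u b j := by
  unfold pvRow
  rw [PySem.List.getD_map_range _ _ _ _ h]

theorem pvDist_min_suffix : ∀ (N : Nat) (w z ru : List Char), w.length + z.length ≤ N →
    ∃ s, s <:+ z ∧ pvDist ru s ≤ pvDist (w ++ ru) z := by
  intro N
  induction N with
  | zero =>
    intro w z ru h
    have hw : w = [] := by cases w <;> simp_all
    exact ⟨z, List.suffix_refl z, by rw [hw]; simp⟩
  | succ N ihN =>
    intro w z ru h
    match w, z with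
    | [], z => exact ⟨z, List.suffix_refl z, le_refl _⟩
    | c :: w', [] =>
      refine ⟨[], List.nil_suffix, ?_⟩
      rw [pvDist_nil_right', pvDist_nil_right']
      simp [List.length_append]
      omega
    | c :: w', y :: z' =>
      obtain ⟨s1, hs1, hb1⟩ := ihN w' (y :: z') ru (by simp at h ⊢; omega)
      obtain ⟨s2, hs2, hb2⟩ := ihN (c :: w') z' ru (by simp at h ⊢; omega)
      obtain ⟨s3, hs3, hb3⟩ := ihN w' z' ru (by simp at h ⊢; omega)
      have hs2' : s2 <:+ y :: z' := hs2.trans (List.suffix_cons y z')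
      have hs3' : s3 <:+ y :: z' := hs3.trans (List.suffix_cons y z')
      simp only [List.cons_append] at hb2
      simp only [List.cons_append]
      rw [pvDist]
      by_cases c1 : pvDist (w' ++ ru) (y :: z') ≤ pvDist (c :: (w' ++ ru)) z'
          ∧ pvDist (w' ++ ru) (y :: z') ≤ pvDist (w' ++ ru) z'
      · exact ⟨s1, hs1, by split_ifs <;> omega⟩
      by_cases c2 : pvDist (c :: (w' ++ ru)) z' ≤ pvDist (w' ++ ru) z'
      · exact ⟨s2, hs2', by split_ifs <;> omega⟩
      · exact ⟨s3, hs3', by split_ifs <;> omega⟩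
def pvStep (ca : Char) (previous : List Int) (st : List Int × Int) (jcb : Int × Char) : List Int × Int :=
  let current := st.1
  let rowMin := st.2
  let v := min (PySem.List.pyGetD previous jcb.1 0 + 1)
             (min (PySem.List.pyGetD current (jcb.1 - 1) 0 + 1)
                  (PySem.List.pyGetD previous (jcb.1 - 1) 0 + (if ca ≠ jcb.2 then 1 else 0)))
  (current ++ [v], min rowMin v)

theorem pvLevRow_eq (ca : Char) (b : List Char) (previous : List Int) (i : Int) :
    pvLevRow ca b previous i
      = (PySem.List.enumerate b 1).foldl (pvStep ca previous) ([i], PySem.List.pyGetD [i] 0 0) := rfl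

theorem pvEntry_succ (ca : Char) (u b : List Char) (n : Nat) (cb : Char) (b2 b1 : List Char)
    (hb : b = b1 ++ cb :: b2) (hn : n = b1.length) :
    pvEntry (ca :: u) b (n + 1)
      = min (pvEntry u b (n + 1) + 1)
          (min (pvEntry (ca :: u) b n + 1) (pvEntry u b n + (if ca ≠ cb then 1 else 0))) := by
  have hnl : n < b.length := by subst hb hn; simp
  have hget : b[n]'hnl = cb := by
    subst hb hn
    rw [List.getElem_append_right (le_refl _)]
    simp
  have hrt : pvRT b (n + 1) = cb :: pvRT b n := by rw [pvRT_succ b n hnl, hget]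
  unfold pvEntry
  rw [hrt, pvDist]
  have hd : (if ca = cb then 0 else 1) = (if ca ≠ cb then 1 else 0) := by
    by_cases h : ca = cb <;> simp [h]
  rw [hd, ← hrt]
  by_cases h : ca = cb <;> simp [h]

theorem pvStep_spec (ca : Char) (u b : List Char) (n : Nat) (cb : Char) (b2 b1 : List Char)
    (hb : b = b1 ++ cb :: b2) (hn : n = b1.length) (rm : Int) :
    pvStep ca (pvRow u b b.length) (pvRow (ca :: u) b n, rm) ((n : Int) + 1, cb)
      = (pvRow (ca :: u) b (n + 1), min rm (pvEntry (ca :: u) b (n + 1))) := by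
  have hnl : n + 1 ≤ b.length := by subst hb hn; simp
  unfold pvStep
  have e1 : ((n : Int) + 1) = ((n + 1 : Nat) : Int) := by push_cast; ring
  have e2 : ((n + 1 : Nat) : Int) - 1 = ((n : Nat) : Int) := by push_cast; ring
  simp only [e1]
  simp only [e2, PySem.List.pyGetD_natCast]
  rw [pvRow_getD u b b.length (n+1) (by omega), pvRow_getD (ca :: u) b n n (by omega),
      pvRow_getD u b b.length n (by omega)]
  refine congrArg₂ Prod.mk ?_ ?_
  · rw [← pvEntry_succ ca u b n cb b2 b1 hb hn]
    unfold pvRow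
    conv_rhs => rw [List.range_succ]
    simp
  · rw [← pvEntry_succ ca u b n cb b2 b1 hb hn]
theorem pvLevRow_gen (ca : Char) (u b : List Char) :
    ∀ (b2 b1 : List Char) (rm : Int), b = b1 ++ b2 →
    (∀ j, j ≤ b1.length → rm ≤ pvEntry (ca :: u) b j) →
    ((PySem.List.enumerate b2 ((b1.length : Int) + 1)).foldl (pvStep ca (pvRow u b b.length))
        (pvRow (ca :: u) b b1.length, rm)).1 = pvRow (ca :: u) b b.length ∧
    ∀ j, j ≤ b.length →
      ((PySem.List.enumerate b2 ((b1.length : Int) + 1)).foldl (pvStep ca (pvRow u b b.length))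
        (pvRow (ca :: u) b b1.length, rm)).2 ≤ pvEntry (ca :: u) b j := by
  intro b2
  induction b2 with
  | nil =>
    intro b1 rm hb hinv
    have : b1 = b := by rw [hb, List.append_nil]
    subst this
    exact ⟨by simp [PySem.List.enumerate_nil], by simpa [PySem.List.enumerate_nil] using hinv⟩
  | cons cb b2' ih =>
    intro b1 rm hb hinv
    rw [PySem.List.enumerate_cons, List.foldl_cons,
        pvStep_spec ca u b b1.length cb b2' b1 hb rfl rm]
    have hlen : ((b1 ++ [cb]).length : Int) = (b1.length : Int) + 1 := by simp
    have hb' : b = (b1 ++ [cb]) ++ b2' := by rw [hb]; simp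
    have hinv' : ∀ j, j ≤ (b1 ++ [cb]).length →
        min rm (pvEntry (ca :: u) b (b1.length + 1)) ≤ pvEntry (ca :: u) b j := by
      intro j hj
      simp only [List.length_append, List.length_singleton] at hj
      rcases Nat.lt_or_ge j (b1.length + 1) with h | h
      · exact le_trans (min_le_left _ _) (hinv j (by omega))
      · have : j = b1.length + 1 := by omega
        rw [this]
        exact min_le_right _ _
    have := ih (b1 ++ [cb]) (min rm (pvEntry (ca :: u) b (b1.length + 1))) hb' hinv'
    rw [hlen] at this
    have hrow : (b1 ++ [cb]).length = b1.length + 1 := by simp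
    rw [hrow] at this
    convert this using 4
theorem pvEntry_zero (w b : List Char) : pvEntry w b 0 = (w.length : Int) := by
  unfold pvEntry
  rw [show pvRT b 0 = [] from rfl, pvDist_nil_right']

theorem pvLevRow_spec (ca : Char) (u b : List Char) :
    (pvLevRow ca b (pvRow u b b.length) ((u.length : Int) + 1)).1 = pvRow (ca :: u) b b.length ∧
    ∀ j, j ≤ b.length →
      (pvLevRow ca b (pvRow u b b.length) ((u.length : Int) + 1)).2 ≤ pvEntry (ca :: u) b j := by
  have h0 : ([((u.length : Int) + 1)], PySem.List.pyGetD [((u.length : Int) + 1)] 0 0)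
      = (pvRow (ca :: u) b 0, ((u.length : Int) + 1)) := by
    refine congrArg₂ Prod.mk ?_ (PySem.List.pyGetD_zero_cons _ _ _)
    unfold pvRow
    simp [List.range_succ, pvEntry_zero]
  have hinv : ∀ j, j ≤ ([] : List Char).length →
      ((u.length : Int) + 1) ≤ pvEntry (ca :: u) b j := by
    intro j hj
    simp at hj
    rw [hj, pvEntry_zero]
    simp
  have := pvLevRow_gen ca u b b [] ((u.length : Int) + 1) rfl hinv
  rw [pvLevRow_eq, h0]
  simpa using this

theorem pvRow_getLast (u b : List Char) (n : Nat) (h : pvRow u b n ≠ []) :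
    (pvRow u b n).getLast h = pvEntry u b n := by
  rw [List.getLast_eq_getElem]
  unfold pvRow
  simp

theorem pvRT_full (b : List Char) : pvRT b b.length = b.reverse := by
  unfold pvRT
  rw [List.take_length]

theorem pvLevLoop_spec (b : List Char) (m : Int) : ∀ (rest u : List Char),
    pvLevLoop b (some m) rest ((u.length : Int) + 1) (pvRow u b b.length)
        = (pvDist (rest.reverse ++ u) b.reverse : Int) ∨
      (pvLevLoop b (some m) rest ((u.length : Int) + 1) (pvRow u b b.length) = m + 1 ∧
        m < (pvDist (rest.reverse ++ u) b.reverse : Int)) := by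
  intro rest
  induction rest with
  | nil =>
    intro u
    left
    show PySem.List.pyGetD (pvRow u b b.length) (-1) 0 = _
    have hne : pvRow u b b.length ≠ [] := by unfold pvRow; simp
    rw [PySem.List.pyGetD_neg_one _ _ hne, pvRow_getLast u b b.length hne]
    unfold pvEntry
    rw [pvRT_full]
    simp
  | cons ca rest' ih =>
    intro u
    obtain ⟨hrow1, hrow2⟩ := pvLevRow_spec ca u b
    have hunf : pvLevLoop b (some m) (ca :: rest') ((u.length : Int) + 1) (pvRow u b b.length)
        = (if (pvLevRow ca b (pvRow u b b.length) ((u.length : Int) + 1)).2 > m then m + 1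
           else pvLevLoop b (some m) rest' (((u.length : Int) + 1) + 1)
             (pvLevRow ca b (pvRow u b b.length) ((u.length : Int) + 1)).1) := rfl
    rw [hunf]
    have hrev : (ca :: rest').reverse ++ u = rest'.reverse ++ (ca :: u) := by
      rw [List.reverse_cons, List.append_assoc]
      rfl
    by_cases hm : (pvLevRow ca b (pvRow u b b.length) ((u.length : Int) + 1)).2 > m
    · right
      rw [if_pos hm]
      refine ⟨rfl, ?_⟩

      obtain ⟨s, hs, hle⟩ := pvDist_min_suffix (rest'.reverse.length + b.reverse.length)
        rest'.reverse b.reverse (ca :: u) (le_refl _)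
      have hsj : s = pvRT b s.length ∧ s.length ≤ b.length := by
        have h1 : s.reverse <+: b := by
          rw [← List.reverse_reverse b] at hs ⊢
          exact List.reverse_suffix.mp (by simpa using hs)
        constructor
        · have h2 := List.prefix_iff_eq_take.mp h1
          rw [List.length_reverse] at h2
          unfold pvRT
          rw [← h2, List.reverse_reverse]
        · calc s.length = s.reverse.length := by rw [List.length_reverse]
            _ ≤ b.length := h1.length_le
      have hrm := hrow2 s.length hsj.2
      rw [hrev]
      calc m < _ := hm
        _ ≤ pvEntry (ca :: u) b s.length := hrm
        _ ≤ (pvDist (rest'.reverse ++ (ca :: u)) b.reverse : Int) := by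
            unfold pvEntry
            rw [← hsj.1]
            exact_mod_cast hle
    · rw [if_neg hm, hrow1, hrev]
      have hadd : ((u.length : Int) + 1) + 1 = (((ca :: u).length : Int) + 1) := by
        simp
      rw [hadd]
      exact ih (ca :: u)
theorem pvRange_eq_row0 (b : List Char) :
    PySem.List.pyRange 0 ((b.length : Int) + 1) 1 = pvRow [] b b.length := by
  have h1 : ((b.length : Int) + 1) = ((b.length + 1 : Nat) : Int) := by push_cast; ring
  rw [h1, PySem.List.pyRange_zero_natCast]
  unfold pvRow
  refine List.map_congr_left ?_
  intro j hj
  rw [List.mem_range] at hj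
  unfold pvEntry
  rw [pvDist_nil_left, pvRT_len b j (by omega)]

theorem pvLev_le_iff (a b : String) (t : Int) :
    (pvLevenshtein a b (some t) ≤ t) ↔ ((pvDist a.toList.reverse b.toList.reverse : Int) ≤ t) := by
  unfold pvLevenshtein
  simp only [PySem.Str.len_eq]
  by_cases hd : |(a.toList.length : Int) - (b.toList.length : Int)| > t
  · rw [if_pos hd]
    have hb := pvDist_len_bound a.toList.reverse b.toList.reverse
    rw [List.length_reverse, List.length_reverse] at hb
    rw [gt_iff_lt, lt_abs] at hd
    constructor
    · intro h; omega
    · intro h; omega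
  · rw [if_neg hd]
    have h0 : (1 : Int) = ((([] : List Char).length : Int) + 1) := by simp
    rw [pvRange_eq_row0, h0]
    rcases pvLevLoop_spec b.toList t a.toList [] with h | ⟨h1, h2⟩
    · rw [h, List.append_nil]
    · rw [h1, List.append_nil] at *
      omega
theorem pvWithin_full (c w : String) (t : Int) :
    pvWithin c.toList w.toList (PySem.Str.len c) (PySem.Str.len w) t
      = decide ((pvDist c.toList.reverse w.toList.reverse : Int) ≤ t) := by
  rw [PySem.Str.len_eq, PySem.Str.len_eq,
      pvWithin_spec c.toList w.toList t _ _ (Int.natCast_nonneg _) (le_refl _)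
        (Int.natCast_nonneg _) (le_refl _)]
  rw [Int.toNat_natCast, Int.toNat_natCast, pvRT_full, pvRT_full]

theorem pvWordLoop_eq_any (c : String) (t : Int) (ws : List String) :
    pvWordLoop c t ws = ws.any (fun word =>
      decide (PySem.List.slice word.toList none (some 1) = PySem.List.slice c.toList none (some 1))
      && pvWithin c.toList word.toList (PySem.Str.len c) (PySem.Str.len word) t) := by
  induction ws with
  | nil => rfl
  | cons w rest ih =>
    rw [List.any_cons, ← ih]
    show (if PySem.List.slice w.toList none (some 1) ≠ PySem.List.slice c.toList none (some 1) then
        pvWordLoop c t rest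
      else if |PySem.Str.len c - PySem.Str.len w| ≤ t ∧ pvLevenshtein c w (some t) ≤ t then true
      else pvWordLoop c t rest) = _
    by_cases hs : PySem.List.slice w.toList none (some 1) = PySem.List.slice c.toList none (some 1)
    · rw [if_neg (by simpa using hs), decide_eq_true hs, Bool.true_and]
      by_cases hcond : |PySem.Str.len c - PySem.Str.len w| ≤ t ∧ pvLevenshtein c w (some t) ≤ t
      · rw [if_pos hcond, pvWithin_full]
        have : (pvDist c.toList.reverse w.toList.reverse : Int) ≤ t := (pvLev_le_iff c w t).mp hcond.2
        simp [this]
      · rw [if_neg hcond, pvWithin_full]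
        have hgt : ¬ ((pvDist c.toList.reverse w.toList.reverse : Int) ≤ t) := by
          intro hle
          apply hcond
          have hb := pvDist_len_bound c.toList.reverse w.toList.reverse
          rw [List.length_reverse, List.length_reverse] at hb
          refine ⟨?_, (pvLev_le_iff c w t).mpr hle⟩
          rw [PySem.Str.len_eq, PySem.Str.len_eq, abs_le]
          omega
        simp [hgt]
    · rw [if_pos (by simpa using hs)]
      have : decide (PySem.List.slice w.toList none (some 1) = PySem.List.slice c.toList none (some 1)) = false :=
        decide_eq_false hs
      rw [this, Bool.false_and, Bool.false_or]

theorem final_eq (candidate source : String) (project_words : List String) :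
    candidate_is_too_close candidate source project_words
      = candidate_is_too_close_alt candidate source project_words := by
  unfold candidate_is_too_close candidate_is_too_close_alt
  simp only []
  rw [pvWithin_full, pvWordLoop_eq_any]
  set t := (if PySem.Str.len source ≤ 5 then (1:Int) else 2) with ht
  by_cases h : (pvDist candidate.toList.reverse source.toList.reverse : Int) ≤ t
  · rw [if_pos ((pvLev_le_iff _ _ _).mpr h), if_pos (decide_eq_true h)]
  · rw [if_neg (fun hc => h ((pvLev_le_iff _ _ _).mp hc)),
        if_neg (fun hc => h (of_decide_eq_true hc))]

-- ===== VERDICT (by name: the statement is the Claim_ definition above) =====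
theorem candidate_is_too_close_spec : Claim_equal_candidate_is_too_close := by
  intro candidate source project_words _
  unfold Spec_candidate_is_too_close
  exact final_eq candidate source project_words
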